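-- pv_equiv track=rewrite | github.com/mengyuqianxun/coding-interview-Python | jianzhioffer/29.py | CountTranslation
-- ===== SOURCE A (Python) =====
-- def CountTranslation(num):
-- 	if num < 0:
-- 		return 0
-- 	s = str(num)
-- 	arr = [0]*(len(s)+1)
-- 	arr[-1] = 1
-- 	for i in range(len(s)-1,-1,-1):
-- 		if i == len(s) - 1:
-- 			arr[i] = arr[i+1]
-- 		if i < len(s) - 1:
-- 			if '10' <= s[i]+s[i+1] <= '25':
-- 				arr[i] = arr[i+1] + arr[i+2]
-- 			else:
-- 				arr[i] = arr[i+1]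
-- 	return arr[0]
-- ===== SOURCE B (Python) =====
-- def _fib(n):
--     a, b = 0, 1
--     for _ in range(n):
--         a, b = b, a + b
--     return a
--
--
-- def CountTranslation(num):
--     # product of Fibonacci numbers over maximal runs of consecutive translatable digit pairs
--     if num < 0:
--         return 0
--     s = str(num)
--     total = 1
--     run = 0
--     for i in range(len(s) - 1):
--         if '10' <= s[i:i+2] <= '25':
--             run += 1
--         else:
--             total *= _fib(run + 2)
--             run = 0
--     return total * _fib(run + 2)
-- ===== Notes on version B (the rewrite author's own statement) =====
-- stated objective: alternative
-- what changed: Replaces the DP recurrence over an array with a combinatorial identity: scan once for maximal runs of consecutive translatable digit pairs and return the product of Fibonacci numbers fib(run+2) over those runs.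
import Mathlib
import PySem

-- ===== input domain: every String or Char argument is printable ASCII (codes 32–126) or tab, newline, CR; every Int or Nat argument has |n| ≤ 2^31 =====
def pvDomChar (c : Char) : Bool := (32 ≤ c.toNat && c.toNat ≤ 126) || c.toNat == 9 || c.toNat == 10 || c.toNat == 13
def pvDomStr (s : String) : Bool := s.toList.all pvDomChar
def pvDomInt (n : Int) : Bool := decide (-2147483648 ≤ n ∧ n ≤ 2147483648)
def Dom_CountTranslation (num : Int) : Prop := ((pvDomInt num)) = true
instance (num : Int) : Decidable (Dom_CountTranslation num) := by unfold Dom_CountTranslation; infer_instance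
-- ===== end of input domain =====

-- B replaces A's backward DP array with a combinatorial identity: one scan over the digit
-- pairs accumulating maximal runs of translatable pairs, multiplying fib(run+2) per run.

-- ===== PORT A =====
-- digit-pair test of A: Python's chained "'10' <= s[i]+s[i+1] <= '25'" — str comparison
-- is code-point lexicographic, which is Lean's '<' on List Char (PySem: "str COMPARISON")
def pvPairOK (a b : Char) : Bool :=
  !decide ([a, b] < ['1', '0']) && !decide (['2', '5'] < [a, b])

-- loop body of A: the two sequential ifs, writing into the array (indices always in range,
-- so the total forms pySetD/pyGetD are exact here)
def pvStepA (s : List Char) (arr : List Int) (i : Int) : List Int :=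
  let arr1 := if i = (s.length : Int) - 1 then
      PySem.List.pySetD arr i (PySem.List.pyGetD arr (i + 1) 0) else arr
  if i < (s.length : Int) - 1 then
    if pvPairOK (PySem.List.pyGetD s i ' ') (PySem.List.pyGetD s (i + 1) ' ') then
      PySem.List.pySetD arr1 i (PySem.List.pyGetD arr1 (i + 1) 0 + PySem.List.pyGetD arr1 (i + 2) 0)
    else
      PySem.List.pySetD arr1 i (PySem.List.pyGetD arr1 (i + 1) 0)
  else arr1

def CountTranslation (num : Int) : Int :=
  if num < 0 then 0
  else
    let s := PySem.Int.toChars num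
    let arr := PySem.List.pySetD (List.replicate (s.length + 1) (0 : Int)) (-1) 1  -- [0]*(len(s)+1); arr[-1] = 1
    let arr := (PySem.List.pyRange ((s.length : Int) - 1) (-1) (-1)).foldl (pvStepA s) arr
    PySem.List.pyGetD arr 0 0

-- ===== PORT B =====
-- _fib of Source B: iterative Fibonacci, a, b = b, a + b repeated n times, return a
def pvFib (n : Int) : Int :=
  ((PySem.List.pyRange 0 n 1).foldl (fun st _ => (st.2, st.1 + st.2)) ((0 : Int), (1 : Int))).1

-- digit-pair test of B on the slice s[i:i+2] (same chained str comparison as A's)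
def pvPairLe (l : List Char) : Bool :=
  !decide (l < ['1', '0']) && !decide (['2', '5'] < l)

-- loop body of B: extend the current run, or close it (multiply fib(run+2)) and reset
def pvStepB (s : List Char) (st : Int × Int) (i : Int) : Int × Int :=
  if pvPairLe (PySem.List.slice s (some i) (some (i + 2))) then (st.1, st.2 + 1)
  else (st.1 * pvFib (st.2 + 2), 0)

def CountTranslation_alt (num : Int) : Int :=
  if num < 0 then 0
  else
    let s := PySem.Int.toChars num
    let st := (PySem.List.pyRange 0 ((s.length : Int) - 1) 1).foldl (pvStepB s) (1, 0)
    st.1 * pvFib (st.2 + 2)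

-- ===== PRECONDITION & SPEC =====
def Spec_CountTranslation (num : Int) (out : Int) : Prop := out = CountTranslation_alt num
instance (num : Int) (out : Int) : Decidable (Spec_CountTranslation num out) := by unfold Spec_CountTranslation; infer_instance

-- ===== CLAIM (what is proved, stated in full; the proofs are below) =====
def Claim_equal_CountTranslation : Prop := ∀ (num : Int), Dom_CountTranslation num → Spec_CountTranslation num (CountTranslation num)

-- ===== LEMMAS AND PROOFS =====

-- reference value: number of translations of a digit string, peeling from the left
def pvWays : List Char → Int
  | [] => 1
  | [_] => 1
  | a :: b :: t => pvWays (b :: t) + (if pvPairOK a b then pvWays t else 0)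

theorem pvWays_cons2 (a b : Char) (t : List Char) :
    pvWays (a :: b :: t) = pvWays (b :: t) + (if pvPairOK a b then pvWays t else 0) := rfl

theorem pvGetD_set_self (xs : List Int) (i : Nat) (v : Int) (h : i < xs.length) :
    (xs.set i v).getD i 0 = v := by
  simp [List.getD_eq_getElem?_getD, List.getElem?_set_self', List.getElem?_eq_getElem h]

theorem pvGetD_set_ne (xs : List Int) (i j : Nat) (v : Int) (h : i ≠ j) :
    (xs.set i v).getD j 0 = xs.getD j 0 := by
  simp [List.getD_eq_getElem?_getD, List.getElem?_set_ne h]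

theorem pvStepA_inv (s : List Char) (arr : List Int) (i : Nat) (hi : i + 1 ≤ s.length)
    (hlen : arr.length = s.length + 1)
    (hinv : ∀ j : Nat, i + 1 ≤ j → j ≤ s.length → arr.getD j 0 = pvWays (s.drop j)) :
    (pvStepA s arr (i : Int)).length = s.length + 1 ∧
    (∀ j : Nat, i ≤ j → j ≤ s.length → (pvStepA s arr (i : Int)).getD j 0 = pvWays (s.drop j)) := by
  have hilt : i < s.length := by omega
  have hcast1 : (i : Int) + 1 = ((i + 1 : Nat) : Int) := by push_cast; ring
  have hcast2 : (i : Int) + 2 = ((i + 2 : Nat) : Int) := by push_cast; ring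
  by_cases hlast : i + 1 = s.length
  · -- i == len(s) - 1 : arr[i] = arr[i+1], second branch skipped
    have hres : pvStepA s arr (i : Int) = arr.set i (arr.getD (i + 1) 0) := by
      unfold pvStepA
      rw [if_pos (by omega : (i : Int) = (s.length : Int) - 1),
          if_neg (by omega : ¬ (i : Int) < (s.length : Int) - 1)]
      rw [hcast1, PySem.List.pyGetD_natCast, PySem.List.pySetD_natCast]
    have hdropi : s.drop i = [s[i]] := by
      rw [List.drop_eq_getElem_cons hilt, show i + 1 = s.length from hlast, List.drop_length]
    refine ⟨by simp [hres, hlen], fun j hij hjn => ?_⟩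
    rcases Nat.eq_or_lt_of_le hij with rfl | hij2
    · rw [hres, pvGetD_set_self _ _ _ (by omega),
          hinv (i + 1) (le_refl _) (by omega), hlast, List.drop_length, hdropi]
      rfl
    · rw [hres, pvGetD_set_ne _ _ _ _ (by omega), hinv j (by omega) hjn]
  · -- i < len(s) - 1 : arr[i] = arr[i+1] (+ arr[i+2] when the pair translates)
    have hi2 : i + 2 ≤ s.length := by omega
    have hi1lt : i + 1 < s.length := by omega
    have hres : pvStepA s arr (i : Int) =
        arr.set i (arr.getD (i + 1) 0 +
          (if pvPairOK s[i] s[i + 1] then arr.getD (i + 2) 0 else 0)) := by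
      unfold pvStepA
      rw [if_neg (by omega : ¬ (i : Int) = (s.length : Int) - 1),
          if_pos (by omega : (i : Int) < (s.length : Int) - 1)]
      rw [hcast1, hcast2]
      simp only [PySem.List.pySetD_natCast, PySem.List.pyGetD_natCast,
        List.getD_eq_getElem _ _ hilt, List.getD_eq_getElem _ _ hi1lt]
      split_ifs <;> simp
    have hdropi : s.drop i = s[i] :: s[i + 1] :: s.drop (i + 2) := by
      rw [List.drop_eq_getElem_cons hilt, List.drop_eq_getElem_cons hi1lt]
    refine ⟨by simp [hres, hlen], fun j hij hjn => ?_⟩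
    rcases Nat.eq_or_lt_of_le hij with rfl | hij2
    · rw [hres, pvGetD_set_self _ _ _ (by omega),
          hinv (i + 1) (le_refl _) (by omega), hinv (i + 2) (by omega) hi2,
          hdropi, pvWays_cons2]
      rw [← List.drop_eq_getElem_cons hi1lt]
    · rw [hres, pvGetD_set_ne _ _ _ _ (by omega), hinv j (by omega) hjn]

theorem pvA_loop (s : List Char) : ∀ (i : Nat) (arr : List Int), i ≤ s.length →
    arr.length = s.length + 1 →
    (∀ j : Nat, i ≤ j → j ≤ s.length → arr.getD j 0 = pvWays (s.drop j)) →
    ((PySem.List.pyRange ((i : Int) - 1) (-1) (-1)).foldl (pvStepA s) arr).getD 0 0 = pvWays s := by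
  intro i
  induction i with
  | zero =>
    intro arr _ _ hinv
    rw [show ((0 : Nat) : Int) - 1 = -1 by norm_num,
        PySem.List.pyRange_neg_one_eq_nil (le_refl (-1)), List.foldl_nil]
    simpa using hinv 0 (le_refl 0) (Nat.zero_le _)
  | succ i ih =>
    intro arr hi hlen hinv
    obtain ⟨hlen2, hinv2⟩ := pvStepA_inv s arr i hi hlen hinv
    rw [show ((i + 1 : Nat) : Int) - 1 = (i : Int) by push_cast; ring,
        PySem.List.pyRange_neg_one_cons (by omega : (-1 : Int) < (i : Int)), List.foldl_cons]
    exact ih (pvStepA s arr (i : Int)) (by omega) hlen2 hinv2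

theorem pvInit_eq (n : Nat) :
    PySem.List.pySetD (List.replicate (n + 1) (0 : Int)) (-1) 1 = List.replicate n 0 ++ [1] := by
  simp [PySem.List.pySetD, PySem.List.pySet?, PySem.List.pyIdx?]
  induction n with
  | zero => simp
  | succ n ih => simpa [List.replicate_succ] using ih

theorem pvA_eq (s : List Char) :
    PySem.List.pyGetD ((PySem.List.pyRange ((s.length : Int) - 1) (-1) (-1)).foldl (pvStepA s)
      (PySem.List.pySetD (List.replicate (s.length + 1) (0 : Int)) (-1) 1)) 0 0 = pvWays s := by
  rw [PySem.List.pyGetD_zero, pvInit_eq]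
  apply pvA_loop s s.length _ (le_refl _) (by simp)
  intro j hj hjn
  have hj2 : j = s.length := by omega
  subst hj2
  rw [List.drop_length, List.getD_eq_getElem _ _ (by simp)]
  simp [List.getElem_append_right, pvWays]

-- ======== B-side: run/Fibonacci characterisation ========

-- the list of pair flags of a digit string
def pvFlags : List Char → List Bool
  | a :: b :: t => pvPairOK a b :: pvFlags (b :: t)
  | _ => []

-- number of translations as a function of the flags alone
def pvW : List Bool → Int
  | [] => 1
  | [f] => if f then 2 else 1
  | f :: g :: t => pvW (g :: t) + if f then pvW t else 0

theorem pvWays_eq_W : ∀ s : List Char, pvWays s = pvW (pvFlags s)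
  | [] => rfl
  | [_] => rfl
  | a :: b :: t => by
    rw [pvWays_cons2, pvWays_eq_W (b :: t), pvWays_eq_W t]
    cases t with
    | nil =>
      simp [pvFlags, pvW]
      split_ifs <;> ring
    | cons c t' => simp [pvFlags, pvW]

-- Fibonacci facts about the port's pvFib
theorem pvFib_pair_succ (k : Nat) :
    (PySem.List.pyRange 0 ((k : Int) + 1) 1).foldl (fun st _ => (st.2, st.1 + st.2)) ((0 : Int), (1 : Int)) =
      (((PySem.List.pyRange 0 (k : Int) 1).foldl (fun st _ => (st.2, st.1 + st.2)) ((0 : Int), (1 : Int))).2,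
       ((PySem.List.pyRange 0 (k : Int) 1).foldl (fun st _ => (st.2, st.1 + st.2)) ((0 : Int), (1 : Int))).1 +
       ((PySem.List.pyRange 0 (k : Int) 1).foldl (fun st _ => (st.2, st.1 + st.2)) ((0 : Int), (1 : Int))).2) := by
  rw [PySem.List.pyRange_one_succ_right (by positivity), List.foldl_append]
  rfl

theorem pvFib_add_two (k : Nat) :
    pvFib ((k : Int) + 2) = pvFib ((k : Int) + 1) + pvFib (k : Int) := by
  unfold pvFib
  rw [show (k : Int) + 2 = ((k + 1 : Nat) : Int) + 1 by push_cast; ring,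
      pvFib_pair_succ (k + 1),
      show ((k + 1 : Nat) : Int) = (k : Int) + 1 by push_cast; ring,
      pvFib_pair_succ k]
  dsimp
  ring

-- two-step equation of pvW, stated once
theorem pvW_cons2 (f g : Bool) (t : List Bool) :
    pvW (f :: g :: t) = pvW (g :: t) + if f then pvW t else 0 := rfl

-- ways of a pure run of r translatable pairs is fib(r+2)
theorem pvW_run : ∀ r : Nat, pvW (List.replicate r true) = pvFib ((r : Int) + 2)
  | 0 => by decide
  | 1 => by decide
  | (r + 2) => by
    rw [show List.replicate (r + 2) true = true :: true :: List.replicate r true by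
          simp [List.replicate_succ],
        pvW_cons2, if_pos rfl,
        show (true : Bool) :: List.replicate r true = List.replicate (r + 1) true by
          simp [List.replicate_succ],
        pvW_run (r + 1), pvW_run r,
        pvFib_add_two (r + 2),
        show ((r + 2 : Nat) : Int) + 1 = ((r + 1 : Nat) : Int) + 2 by push_cast; ring,
        show ((r + 2 : Nat) : Int) = ((r : Nat) : Int) + 2 by push_cast; ring]

-- a closed run of r pairs followed by a non-translatable pair factors out fib(r+2)
theorem pvW_run_false : ∀ (r : Nat) (g : List Bool),
    pvW (List.replicate r true ++ false :: g) = pvFib ((r : Int) + 2) * pvW g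
  | 0, g => by
    rw [List.replicate_zero, List.nil_append,
        show pvFib (((0 : Nat) : Int) + 2) = 1 by decide, one_mul]
    cases g with
    | nil => rfl
    | cons x xs => rw [pvW_cons2, if_neg (by simp), add_zero]
  | 1, g => by
    rw [show List.replicate 1 true ++ false :: g = true :: false :: g by simp,
        pvW_cons2, if_pos rfl]
    have h0 := pvW_run_false 0 g
    rw [List.replicate_zero, List.nil_append] at h0
    rw [h0, show pvFib (((0 : Nat) : Int) + 2) = 1 by decide, one_mul,
        show pvFib (((1 : Nat) : Int) + 2) = 2 by decide]
    ring
  | (r + 2), g => by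
    rw [show List.replicate (r + 2) true ++ false :: g
          = true :: true :: (List.replicate r true ++ false :: g) by
          simp [List.replicate_succ],
        pvW_cons2, if_pos rfl,
        show (true : Bool) :: (List.replicate r true ++ false :: g)
          = List.replicate (r + 1) true ++ false :: g by simp [List.replicate_succ],
        pvW_run_false (r + 1) g, pvW_run_false r g,
        pvFib_add_two (r + 2),
        show ((r + 2 : Nat) : Int) + 1 = ((r + 1 : Nat) : Int) + 2 by push_cast; ring,
        show ((r + 2 : Nat) : Int) = ((r : Nat) : Int) + 2 by push_cast; ring]
    ring

-- abstract version of B's loop body, over a flag instead of an index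
def pvStepF (st : Int × Int) (f : Bool) : Int × Int :=
  if f then (st.1, st.2 + 1) else (st.1 * pvFib (st.2 + 2), 0)

-- B's fold over flags computes total · W(pending run ++ remaining flags)
theorem pvFoldF (g : List Bool) : ∀ (t : Int) (r : Nat),
    (g.foldl pvStepF (t, (r : Int))).1 * pvFib ((g.foldl pvStepF (t, (r : Int))).2 + 2)
      = t * pvW (List.replicate r true ++ g) := by
  induction g with
  | nil =>
    intro t r
    simp [pvW_run r]
  | cons f g ih =>
    intro t r
    cases f with
    | true =>
      have hstep : pvStepF (t, (r : Int)) true = (t, ((r + 1 : Nat) : Int)) := by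
        unfold pvStepF
        rw [if_pos rfl]
        congr 1
      rw [List.foldl_cons, hstep, ih t (r + 1),
          show List.replicate r true ++ true :: g = List.replicate (r + 1) true ++ g by
            simp [List.replicate_succ']]
    | false =>
      have hstep : pvStepF (t, (r : Int)) false
          = (t * pvFib ((r : Int) + 2), ((0 : Nat) : Int)) := by
        unfold pvStepF
        rw [if_neg (by simp)]
        simp
      rw [List.foldl_cons, hstep, ih (t * pvFib ((r : Int) + 2)) 0, pvW_run_false r g]
      simp
      ring

-- the index fold of the port equals the flag fold
theorem pvB_index_fold (s : List Char) : ∀ (k i : Nat) (st : Int × Int),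
    i + k + 1 = s.length →
    (PySem.List.pyRange (i : Int) ((s.length : Int) - 1) 1).foldl (pvStepB s) st
      = (pvFlags (s.drop i)).foldl pvStepF st := by
  intro k
  induction k with
  | zero =>
    intro i st h
    rw [PySem.List.pyRange_one_eq_nil (by omega), List.foldl_nil]
    have : s.drop i = [s[i]'(by omega)] := by
      rw [List.drop_eq_getElem_cons (by omega), show i + 1 = s.length by omega, List.drop_length]
    rw [this]
    rfl
  | succ k ih =>
    intro i st h
    have hi1 : i + 1 < s.length := by omega
    have hi : i < s.length := by omega
    rw [PySem.List.pyRange_one_cons (by omega), List.foldl_cons]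
    have hslice : PySem.List.slice s (some (i : Int)) (some ((i : Int) + 2))
        = [s[i], s[i + 1]] := by
      rw [show (i : Int) + 2 = (i : Int) + ((2 : Nat) : Int) by norm_num,
          PySem.List.slice_natCast_add,
          List.drop_eq_getElem_cons hi, List.drop_eq_getElem_cons hi1]
      rfl
    have hdrop : s.drop i = s[i] :: s[i + 1] :: s.drop (i + 2) := by
      rw [List.drop_eq_getElem_cons hi, List.drop_eq_getElem_cons hi1]
    have hstep : pvStepB s st (i : Int) = pvStepF st (pvPairOK s[i] s[i + 1]) := by
      unfold pvStepB pvStepF pvPairLe pvPairOK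
      rw [hslice]
    rw [hstep, show (i : Int) + 1 = ((i + 1 : Nat) : Int) by push_cast; ring,
        ih (i + 1) _ (by omega), hdrop]
    rw [show pvFlags (s[i] :: s[i + 1] :: s.drop (i + 2))
          = pvPairOK s[i] s[i + 1] :: pvFlags (s[i + 1] :: s.drop (i + 2)) from rfl,
        List.foldl_cons, ← List.drop_eq_getElem_cons hi1]

theorem pvB_eq (s : List Char) :
    (((PySem.List.pyRange 0 ((s.length : Int) - 1) 1).foldl (pvStepB s) (1, 0)).1
      * pvFib (((PySem.List.pyRange 0 ((s.length : Int) - 1) 1).foldl (pvStepB s) (1, 0)).2 + 2))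
      = pvWays s := by
  by_cases h0 : s = []
  · subst h0
    decide
  · have hpos : 0 < s.length := List.length_pos_iff.mpr h0
    obtain ⟨n, hs⟩ : ∃ n, s.length = n + 1 := ⟨s.length - 1, by omega⟩
    have hfold : (PySem.List.pyRange 0 ((s.length : Int) - 1) 1).foldl (pvStepB s) (1, 0)
        = (pvFlags s).foldl pvStepF (1, 0) := by
      have h := pvB_index_fold s n 0 (1, ((0 : Nat) : Int)) (by omega)
      simpa using h
    have hW := pvFoldF (pvFlags s) 1 0
    simp only [List.replicate_zero, List.nil_append, Nat.cast_zero] at hW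
    rw [hfold, hW, one_mul, ← pvWays_eq_W s]

-- ===== VERDICT (by name: the statement is the Claim_ definition above) =====
theorem CountTranslation_spec : Claim_equal_CountTranslation := by
  intro num _
  unfold Spec_CountTranslation CountTranslation CountTranslation_alt
  by_cases h : num < 0
  · simp [h]
  · simp only [h, if_false]
    rw [pvA_eq, pvB_eq]
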